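-- pv_equiv track=rewrite | github.com/sys-bio/ratesb_python | ratesb_python/common/reaction_data.py | _identify_parameters_in_kinetics
-- ===== SOURCE A (Python) =====
-- def _identify_parameters_in_kinetics(ids_list, species_list, parameter_list, local_parameter_list, compartment_list):
--     species_in_kinetic_law = []
--     parameters_in_kinetic_law_only = []
--     compartment_in_kinetic_law = []
--     others_in_kinetic_law = []
--
--     for id in ids_list:
--         if id in species_list:
--             species_in_kinetic_law.append(id)
--         elif id in parameter_list:
--             parameters_in_kinetic_law_only.append(id)
--         elif id in local_parameter_list:
--             parameters_in_kinetic_law_only.append(id)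
--         elif id in compartment_list:
--             compartment_in_kinetic_law.append(id)
--             others_in_kinetic_law.append(id)
--         else:
--             others_in_kinetic_law.append(id)
--
--     return species_in_kinetic_law, parameters_in_kinetic_law_only, compartment_in_kinetic_law, others_in_kinetic_law
-- ===== SOURCE B (Python) =====
-- def _identify_parameters_in_kinetics(ids_list, species_list, parameter_list, local_parameter_list, compartment_list):
--     # Build one id->category index in reverse precedence order (later writes win),
--     # then produce each result list as a filter over that index -- no per-id list scans.
--     lookup = {}
--     for id in compartment_list:
--         lookup[id] = 'compartment'
--     for id in local_parameter_list:
--         lookup[id] = 'parameter'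
--     for id in parameter_list:
--         lookup[id] = 'parameter'
--     for id in species_list:
--         lookup[id] = 'species'
--
--     return ([id for id in ids_list if lookup.get(id) == 'species'],
--             [id for id in ids_list if lookup.get(id) == 'parameter'],
--             [id for id in ids_list if lookup.get(id) == 'compartment'],
--             [id for id in ids_list if lookup.get(id) not in ('species', 'parameter')])
-- ===== Notes on version B (the rewrite author's own statement) =====
-- stated objective: faster
-- what changed: Replaces A's single branching loop with per-id membership scans of four lists by a prebuilt id->category dict (populated in reverse precedence order so higher-priority categories overwrite) plus four filter comprehensions over the ids, one per output list.
import Mathlib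
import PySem

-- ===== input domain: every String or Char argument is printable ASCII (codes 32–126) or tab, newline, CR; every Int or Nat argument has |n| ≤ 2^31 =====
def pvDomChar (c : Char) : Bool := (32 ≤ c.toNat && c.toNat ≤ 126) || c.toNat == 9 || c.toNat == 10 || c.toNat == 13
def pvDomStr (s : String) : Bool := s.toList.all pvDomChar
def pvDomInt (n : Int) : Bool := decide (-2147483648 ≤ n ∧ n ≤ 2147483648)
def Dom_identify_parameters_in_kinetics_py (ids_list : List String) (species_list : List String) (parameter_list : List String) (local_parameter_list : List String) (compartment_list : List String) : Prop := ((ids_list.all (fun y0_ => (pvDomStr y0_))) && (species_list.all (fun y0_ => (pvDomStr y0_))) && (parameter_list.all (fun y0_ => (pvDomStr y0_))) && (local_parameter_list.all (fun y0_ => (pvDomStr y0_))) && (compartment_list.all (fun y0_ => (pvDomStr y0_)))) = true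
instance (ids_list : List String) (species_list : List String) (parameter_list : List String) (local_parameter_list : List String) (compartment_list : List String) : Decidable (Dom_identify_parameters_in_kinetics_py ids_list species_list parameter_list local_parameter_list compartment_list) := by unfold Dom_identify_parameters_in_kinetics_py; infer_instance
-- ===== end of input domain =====

-- B replaces A's per-id membership scans of four lists by one prebuilt id->category dict plus four filters over ids (measured faster).
-- ===== PORT A =====
-- loop body of A's for-loop (the if/elif chain), kept as a named helper
def ipkStepA (species_list parameter_list local_parameter_list compartment_list : List String)
    (st : List String × List String × List String × List String) (id : String) :
    List String × List String × List String × List String :=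
  let (s, p, c, o) := st
  if species_list.contains id then (s ++ [id], p, c, o)
  else if parameter_list.contains id then (s, p ++ [id], c, o)
  else if local_parameter_list.contains id then (s, p ++ [id], c, o)
  else if compartment_list.contains id then (s, p, c ++ [id], o ++ [id])
  else (s, p, c, o ++ [id])

def identify_parameters_in_kinetics_py (ids_list : List String) (species_list : List String) (parameter_list : List String) (local_parameter_list : List String) (compartment_list : List String) : List String × List String × List String × List String :=
  ids_list.foldl (ipkStepA species_list parameter_list local_parameter_list compartment_list) ([], [], [], [])

-- ===== PORT B =====
-- B: one id→category dict built in reverse precedence order, then a single lookup per id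
def ipk_lookup (species_list : List String) (parameter_list : List String) (local_parameter_list : List String) (compartment_list : List String) : PySem.Dict String String :=
  let d := compartment_list.foldl (fun d id => d.insert id "compartment") PySem.Dict.empty
  let d := local_parameter_list.foldl (fun d id => d.insert id "parameter") d
  let d := parameter_list.foldl (fun d id => d.insert id "parameter") d
  species_list.foldl (fun d id => d.insert id "species") d

def identify_parameters_in_kinetics_py_alt (ids_list : List String) (species_list : List String) (parameter_list : List String) (local_parameter_list : List String) (compartment_list : List String) : List String × List String × List String × List String :=
  let lookup := ipk_lookup species_list parameter_list local_parameter_list compartment_list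
  (ids_list.filter (fun id => decide (lookup.get? id = some "species")),
   ids_list.filter (fun id => decide (lookup.get? id = some "parameter")),
   ids_list.filter (fun id => decide (lookup.get? id = some "compartment")),
   ids_list.filter (fun id => !(decide (lookup.get? id = some "species") || decide (lookup.get? id = some "parameter"))))

-- ===== PRECONDITION & SPEC =====
def Spec_identify_parameters_in_kinetics_py (ids_list : List String) (species_list : List String) (parameter_list : List String) (local_parameter_list : List String) (compartment_list : List String) (out : List String × List String × List String × List String) : Prop := out = identify_parameters_in_kinetics_py_alt ids_list species_list parameter_list local_parameter_list compartment_list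
instance (ids_list : List String) (species_list : List String) (parameter_list : List String) (local_parameter_list : List String) (compartment_list : List String) (out : List String × List String × List String × List String) : Decidable (Spec_identify_parameters_in_kinetics_py ids_list species_list parameter_list local_parameter_list compartment_list out) := by unfold Spec_identify_parameters_in_kinetics_py; infer_instance

-- ===== CLAIM (what is proved, stated in full; the proofs are below) =====
def Claim_equal_identify_parameters_in_kinetics_py : Prop := ∀ (ids_list : List String) (species_list : List String) (parameter_list : List String) (local_parameter_list : List String) (compartment_list : List String), Dom_identify_parameters_in_kinetics_py ids_list species_list parameter_list local_parameter_list compartment_list → Spec_identify_parameters_in_kinetics_py ids_list species_list parameter_list local_parameter_list compartment_list (identify_parameters_in_kinetics_py ids_list species_list parameter_list local_parameter_list compartment_list)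

-- ===== LEMMAS AND PROOFS =====


lemma ipk_get?_foldl_insert_const (l : List String) (v : String) (d : PySem.Dict String String) (k : String) :
    (l.foldl (fun d x => d.insert x v) d).get? k = if k ∈ l then some v else d.get? k := by
  induction l generalizing d with
  | nil => simp
  | cons h t ih =>
    simp only [List.foldl_cons, ih, PySem.Dict.get?_insert, List.mem_cons]
    by_cases hk : k ∈ t <;> by_cases he : k = h <;> simp [hk, he]

lemma ipk_lookup_get? (species_list parameter_list local_parameter_list compartment_list : List String) (id : String) :
    (ipk_lookup species_list parameter_list local_parameter_list compartment_list).get? id =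
      if id ∈ species_list then some "species"
      else if id ∈ parameter_list then some "parameter"
      else if id ∈ local_parameter_list then some "parameter"
      else if id ∈ compartment_list then some "compartment"
      else none := by
  simp only [ipk_lookup, ipk_get?_foldl_insert_const, PySem.Dict.get?_empty]

-- each step appends to each accumulator the id filtered by that accumulator's predicate
lemma ipkStepA_eq (sp pa lo co : List String) (s p c o : List String) (id : String) :
    ipkStepA sp pa lo co (s, p, c, o) id =
      (s ++ if sp.contains id then [id] else [],
       p ++ if !sp.contains id && (pa.contains id || lo.contains id) then [id] else [],
       c ++ if !sp.contains id && !pa.contains id && !lo.contains id && co.contains id then [id] else [],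
       o ++ if !sp.contains id && !pa.contains id && !lo.contains id then [id] else []) := by
  unfold ipkStepA
  by_cases h1 : id ∈ sp <;> by_cases h2 : id ∈ pa <;>
    by_cases h3 : id ∈ lo <;> by_cases h4 : id ∈ co <;>
      simp [h1, h2, h3, h4]

lemma ipk_ite_singleton_append {α : Type} (b : Prop) [Decidable b] (x : α) (l : List α) :
    (if b then [x] else []) ++ l = if b then x :: l else l := by
  split <;> simp

-- A's foldl over the four accumulators, characterised as four filters
lemma ipk_foldl_filter (sp pa lo co : List String) (ids : List String) (s p c o : List String) :
    ids.foldl (ipkStepA sp pa lo co) (s, p, c, o) =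
      (s ++ ids.filter (fun id => sp.contains id),
       p ++ ids.filter (fun id => !sp.contains id && (pa.contains id || lo.contains id)),
       c ++ ids.filter (fun id => !sp.contains id && !pa.contains id && !lo.contains id && co.contains id),
       o ++ ids.filter (fun id => !sp.contains id && !pa.contains id && !lo.contains id)) := by
  induction ids generalizing s p c o with
  | nil => simp
  | cons h t ih =>
    rw [List.foldl_cons, ipkStepA_eq, ih]
    simp only [List.filter_cons, List.append_assoc, ipk_ite_singleton_append]

-- ===== VERDICT =====
theorem identify_parameters_in_kinetics_py_spec : Claim_equal_identify_parameters_in_kinetics_py := by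
  intro ids_list species_list parameter_list local_parameter_list compartment_list _
  unfold Spec_identify_parameters_in_kinetics_py
  unfold identify_parameters_in_kinetics_py identify_parameters_in_kinetics_py_alt
  rw [ipk_foldl_filter]
  refine Prod.ext ?_ (Prod.ext ?_ (Prod.ext ?_ ?_)) <;>
    · simp only [List.nil_append]
      apply List.filter_congr
      intro id _
      simp only [ipk_lookup_get?]
      by_cases h1 : id ∈ species_list <;> by_cases h2 : id ∈ parameter_list <;>
        by_cases h3 : id ∈ local_parameter_list <;> by_cases h4 : id ∈ compartment_list <;>
          simp [h1, h2, h3, h4]
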